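-- pv_equiv track=rewrite | github.com/nonrice/compprog | usaco/contest/2022/2022_february_bronze_1.py | count_merges
-- ===== SOURCE A (Python) =====
-- def count_merges(arr):
--     n = sum(arr)
--
--     for f in range(1, n+1):
--         if n%f == 0:
--             total = 0
--             merges = 0
--             new_element = True
--
--             for x in arr:
--                 if new_element:
--                     new_element = False
--                 else:
--                     merges += 1
--
--                 total += x
--
--                 if total > f:
--                     merges = -1
--                     break;
--                 if total == f:
--                     total = 0
--                     new_element = True
--
--             if merges > -1:
--                 return merges
--
--     return 0
-- ===== SOURCE B (Python) =====
-- def _block_merges(arr, f):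
--     # Greedy split into blocks summing exactly f; None if a block overshoots.
--     total = 0
--     merges = 0
--     new_block = True
--     for x in arr:
--         if not new_block:
--             merges += 1
--         new_block = False
--         total += x
--         if total > f:
--             return None
--         if total == f:
--             total = 0
--             new_block = True
--     return merges
--
--
-- def count_merges(arr):
--     n = sum(arr)
--     small = []
--     large = []
--     f = 1
--     while f * f <= n:          # enumerate divisors of n in cofactor pairs
--         if n % f == 0:
--             small.append(f)
--             if f * f != n:
--                 large.append(n // f)
--         f += 1
--     for f in small + large[::-1]:   # all divisors of n, ascending
--         m = _block_merges(arr, f)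
--         if m is not None:
--             return m
--     return 0
-- ===== Notes on version B (the rewrite author's own statement) =====
-- stated objective: alternative
-- what changed: Instead of scanning every f in 1..n=sum(arr) for divisors, B enumerates the divisors of n in cofactor pairs up to sqrt(n), concatenates the small divisors with the reversed large cofactors to get them in ascending order, and runs the same greedy block check per divisor.
import Mathlib
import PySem

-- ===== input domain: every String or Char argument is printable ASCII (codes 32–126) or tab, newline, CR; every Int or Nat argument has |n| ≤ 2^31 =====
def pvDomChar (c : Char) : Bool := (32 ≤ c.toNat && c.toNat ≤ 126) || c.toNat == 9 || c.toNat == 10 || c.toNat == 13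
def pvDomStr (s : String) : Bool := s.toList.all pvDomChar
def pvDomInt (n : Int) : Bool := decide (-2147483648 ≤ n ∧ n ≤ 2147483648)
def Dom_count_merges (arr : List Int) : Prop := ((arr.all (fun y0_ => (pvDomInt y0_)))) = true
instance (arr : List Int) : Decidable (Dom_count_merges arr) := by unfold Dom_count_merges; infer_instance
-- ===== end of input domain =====

-- B replaces A's scan of every f in 1..sum(arr) by a paired divisor enumeration up to
-- the square root (small divisors, then reversed large cofactors), same greedy check per divisor.

-- ===== PORT A =====
-- A's inner for-loop over arr (with its break) as structural recursion: state (total, merges, new_element)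
def aCheck (f : Int) : List Int → Int → Int → Bool → Int
  | [], _, merges, _ => merges
  | x :: xs, total, merges, ne =>
    let merges1 := if ne then merges else merges + 1
    let total1 := total + x
    if total1 > f then -1
    else if total1 = f then aCheck f xs 0 merges1 true
    else aCheck f xs total1 merges1 false

-- A's outer for-loop over range(1, n+1) with early return
def aLoop (arr : List Int) (n : Int) : List Int → Int
  | [] => 0
  | f :: fs =>
    if PySem.Int.mod n f = 0 then
      let r := aCheck f arr 0 0 true
      if r > -1 then r else aLoop arr n fs
    else aLoop arr n fs

def count_merges (arr : List Int) : Int :=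
  aLoop arr arr.sum (PySem.List.pyRange 1 (arr.sum + 1) 1)

-- ===== PORT B =====
-- B's _block_merges helper: greedy split, None on overshoot
def bGreedy (f : Int) : List Int → Int → Int → Bool → Option Int
  | [], _, merges, _ => some merges
  | x :: xs, total, merges, nb =>
    let merges1 := if nb then merges else merges + 1
    let total1 := total + x
    if total1 > f then none
    else if total1 = f then bGreedy f xs 0 merges1 true
    else bGreedy f xs total1 merges1 false

-- B's while loop: collect small divisors and large cofactors
def bDivLoop (n f : Int) (small large : List Int) : List Int × List Int :=
  if h : f * f ≤ n then
    if PySem.Int.mod n f = 0 then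
      bDivLoop n (f + 1) (small ++ [f])
        (if f * f ≠ n then large ++ [PySem.Int.floordiv n f] else large)
    else bDivLoop n (f + 1) small large
  else (small, large)
termination_by (n + 1 - f).toNat
decreasing_by
  all_goals
    have h1 : (0:Int) ≤ f * f := mul_self_nonneg f
    have h2 : 2 * f - 1 ≤ f * f := by nlinarith
    omega

-- B's final for-loop with early return
def bRun (arr : List Int) : List Int → Int
  | [] => 0
  | f :: fs =>
    match bGreedy f arr 0 0 true with
    | some m => m
    | none => bRun arr fs

def count_merges_alt (arr : List Int) : Int :=
  let n := arr.sum
  let p := bDivLoop n 1 [] []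
  bRun arr (p.1 ++ p.2.reverse)

-- ===== PRECONDITION & SPEC =====
def Spec_count_merges (arr : List Int) (out : Int) : Prop := out = count_merges_alt arr
instance (arr : List Int) (out : Int) : Decidable (Spec_count_merges arr out) := by unfold Spec_count_merges; infer_instance

-- ===== CLAIM (what is proved, stated in full; the proofs are below) =====
def Claim_equal_count_merges : Prop := ∀ (arr : List Int), Dom_count_merges arr → Spec_count_merges arr (count_merges arr)

-- ===== LEMMAS AND PROOFS =====

-- the inner checks agree: A's returns -1 exactly where B's returns none
theorem aCheck_eq_bGreedy (f : Int) : ∀ (xs : List Int) (t mg : Int) (ne : Bool), 0 ≤ mg →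
    aCheck f xs t mg ne = (bGreedy f xs t mg ne).getD (-1) ∧
    ∀ m ∈ bGreedy f xs t mg ne, 0 ≤ m := by
  intro xs
  induction xs with
  | nil =>
    intro t mg ne h
    refine ⟨by simp [aCheck, bGreedy], ?_⟩
    intro m hm
    simp [bGreedy] at hm
    omega
  | cons x xs ih =>
    intro t mg ne h
    simp only [aCheck, bGreedy]
    by_cases h1 : t + x > f
    · simp [h1]
    · by_cases h2 : t + x = f
      · simpa [h1, h2] using ih 0 (if ne then mg else mg + 1) true (by split <;> omega)
      · simpa [h1, h2] using ih (t + x) (if ne then mg else mg + 1) false (by split <;> omega)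

-- A's outer loop = B's run over the divisors kept by the filter
theorem aLoop_eq_bRun (arr : List Int) (n : Int) : ∀ (l : List Int),
    aLoop arr n l = bRun arr (l.filter (fun f => decide (PySem.Int.mod n f = 0))) := by
  intro l
  induction l with
  | nil => simp [aLoop, bRun]
  | cons f fs ih =>
    simp only [aLoop, List.filter_cons]
    by_cases hd : PySem.Int.mod n f = 0
    · obtain ⟨he, hp⟩ := aCheck_eq_bGreedy f arr 0 0 true (le_refl 0)
      cases hb : bGreedy f arr 0 0 true with
      | some m =>
        have hm : 0 ≤ m := hp m (by rw [hb]; exact Option.mem_some_self m)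
        rw [hb] at he
        simp [hd, bRun, hb, he, show (-1:Int) < m by omega]
      | none =>
        rw [hb] at he
        simp [hd, bRun, hb, he, ih]
    · simp [hd, ih]

-- Nat-side divisor lists
def natDivs (m : Nat) : List Nat := (List.range' 1 m).filter (fun f => decide (m % f = 0))
def natSmall (m : Nat) : List Nat := (List.range' 1 (Nat.sqrt m)).filter (fun f => decide (m % f = 0))
def natLargeSrc (m : Nat) : List Nat :=
  (List.range' 1 (Nat.sqrt m)).filter (fun f => decide (m % f = 0 ∧ f * f ≠ m))

theorem divs_split (m : Nat) (hm : 1 ≤ m) :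
    natSmall m ++ ((natLargeSrc m).map (fun f => m / f)).reverse = natDivs m := by
  have hmemD : ∀ x, x ∈ natDivs m ↔ (1 ≤ x ∧ x ≤ m ∧ x ∣ m) := by
    intro x
    simp only [natDivs, List.mem_filter, List.mem_range'_1, decide_eq_true_eq,
      ← Nat.dvd_iff_mod_eq_zero]
    constructor
    · rintro ⟨⟨h1, h2⟩, h3⟩; exact ⟨h1, by omega, h3⟩
    · rintro ⟨h1, h2, h3⟩; exact ⟨⟨h1, by omega⟩, h3⟩
  have hmemS : ∀ x, x ∈ natSmall m ↔ (1 ≤ x ∧ x ≤ Nat.sqrt m ∧ x ∣ m) := by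
    intro x
    simp only [natSmall, List.mem_filter, List.mem_range'_1, decide_eq_true_eq,
      ← Nat.dvd_iff_mod_eq_zero]
    constructor
    · rintro ⟨⟨h1, h2⟩, h3⟩; exact ⟨h1, by omega, h3⟩
    · rintro ⟨h1, h2, h3⟩; exact ⟨⟨h1, by omega⟩, h3⟩
  have hmemL : ∀ x, x ∈ natLargeSrc m ↔ (1 ≤ x ∧ x ≤ Nat.sqrt m ∧ x ∣ m ∧ x * x ≠ m) := by
    intro x
    simp only [natLargeSrc, List.mem_filter, List.mem_range'_1, decide_eq_true_eq,
      ← Nat.dvd_iff_mod_eq_zero]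
    constructor
    · rintro ⟨⟨h1, h2⟩, h3, h4⟩; exact ⟨h1, by omega, h3, h4⟩
    · rintro ⟨h1, h2, h3, h4⟩; exact ⟨⟨h1, by omega⟩, h3, h4⟩
  -- a small divisor's cofactor is large
  have hA : ∀ f, f ∣ m → 1 ≤ f → f ≤ Nat.sqrt m → f * f ≠ m → Nat.sqrt m < m / f := by
    intro f hdvd h1 h2 h3
    by_contra hle
    rw [not_lt] at hle
    have e1 : f * (m / f) = m := Nat.mul_div_cancel' hdvd
    have e2 : m ≤ f * Nat.sqrt m := by
      calc m = f * (m / f) := e1.symm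
        _ ≤ f * Nat.sqrt m := Nat.mul_le_mul_left f hle
    have e3 : f * Nat.sqrt m ≤ Nat.sqrt m * Nat.sqrt m := Nat.mul_le_mul_right _ h2
    have e4 : Nat.sqrt m * Nat.sqrt m ≤ m := Nat.sqrt_le m
    have e5 : f * Nat.sqrt m = Nat.sqrt m * Nat.sqrt m := by omega
    have hs1 : 1 ≤ Nat.sqrt m := by omega
    have e6 : f = Nat.sqrt m := Nat.eq_of_mul_eq_mul_right (by omega : 0 < Nat.sqrt m) e5
    have e7 : Nat.sqrt m * Nat.sqrt m = m := by omega
    apply h3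
    rw [e6, e7]
  -- a large divisor's cofactor is small, and the correspondence is involutive
  have hB : ∀ x, x ∣ m → m ≠ 0 → Nat.sqrt m < x →
      m / x ≤ Nat.sqrt m ∧ 1 ≤ m / x ∧ m / (m / x) = x ∧ (m / x) * (m / x) ≠ m := by
    intro x hdvd hm0 hx
    have hxm : x ≤ m := Nat.le_of_dvd (by omega) hdvd
    have c1 : m / x ≤ m / (Nat.sqrt m + 1) := Nat.div_le_div_left (by omega) (by omega)
    have c2 : m / (Nat.sqrt m + 1) < Nat.sqrt m + 1 := by
      rw [Nat.div_lt_iff_lt_mul (by omega)]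
      exact Nat.lt_succ_sqrt m
    have c3 : m / x ≤ Nat.sqrt m := by omega
    have c4 : 1 ≤ m / x := (Nat.one_le_div_iff (by omega)).2 hxm
    have c5 : m / (m / x) = x := Nat.div_div_self hdvd hm0
    refine ⟨c3, c4, c5, ?_⟩
    intro hsq
    have c6 : m / x * (m / x) / (m / x) = m / x := Nat.mul_div_cancel (m := m / x) (by omega)
    rw [hsq] at c6
    omega
  have hC : ∀ a b, a ∣ m → b ∣ m → 1 ≤ a → a < b → m ≠ 0 → m / b < m / a := by
    intro a b ha hb h1 hab hm0
    have hle : m / b ≤ m / a := Nat.div_le_div_left (by omega) (by omega)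
    rcases Nat.lt_or_ge (m / b) (m / a) with h | h
    · exact h
    · exfalso
      have he : m / a = m / b := by omega
      have e1 : a * (m / a) = m := Nat.mul_div_cancel' ha
      have e2 : b * (m / b) = m := Nat.mul_div_cancel' hb
      have hq : 1 ≤ m / b := (Nat.one_le_div_iff (by omega)).2 (Nat.le_of_dvd (by omega) hb)
      rw [he] at e1
      have heq : a * (m / b) = b * (m / b) := by rw [e1, e2]
      have : a = b := Nat.eq_of_mul_eq_mul_right hq heq
      omega
  have hm0 : m ≠ 0 := by omega
  -- sortedness of all pieces
  have sortD : (natDivs m).Pairwise (· < ·) :=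
    List.Pairwise.sublist List.filter_sublist List.pairwise_lt_range'
  have sortS : (natSmall m).Pairwise (· < ·) :=
    List.Pairwise.sublist List.filter_sublist List.pairwise_lt_range'
  have sortLsrc : (natLargeSrc m).Pairwise (· < ·) :=
    List.Pairwise.sublist List.filter_sublist List.pairwise_lt_range'
  have sortL : (((natLargeSrc m).map (fun f => m / f)).reverse).Pairwise (· < ·) := by
    rw [List.pairwise_reverse, List.pairwise_map]
    refine List.Pairwise.imp_of_mem ?_ sortLsrc
    intro a b ha hb hab
    obtain ⟨ha1, _, ha3, _⟩ := (hmemL a).1 ha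
    obtain ⟨hb1, _, hb3, _⟩ := (hmemL b).1 hb
    exact hC a b ha3 hb3 ha1 hab hm0
  have sortLHS : (natSmall m ++ ((natLargeSrc m).map (fun f => m / f)).reverse).Pairwise (· < ·) := by
    rw [List.pairwise_append]
    refine ⟨sortS, sortL, ?_⟩
    intro a ha b hb
    obtain ⟨ha1, ha2, ha3⟩ := (hmemS a).1 ha
    rw [List.mem_reverse, List.mem_map] at hb
    obtain ⟨f, hf, rfl⟩ := hb
    obtain ⟨hf1, hf2, hf3, hf4⟩ := (hmemL f).1 hf
    have := hA f hf3 hf1 hf2 hf4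
    omega
  -- same members
  have hmem : ∀ x, x ∈ natSmall m ++ ((natLargeSrc m).map (fun f => m / f)).reverse ↔ x ∈ natDivs m := by
    intro x
    rw [List.mem_append, List.mem_reverse, List.mem_map, hmemS x, hmemD x]
    constructor
    · rintro (⟨h1, h2, h3⟩ | ⟨f, hf, rfl⟩)
      · exact ⟨h1, Nat.le_of_dvd (by omega) h3, h3⟩
      · obtain ⟨hf1, hf2, hf3, hf4⟩ := (hmemL f).1 hf
        have hdvd : m / f ∣ m := Nat.div_dvd_of_dvd hf3
        have := hA f hf3 hf1 hf2 hf4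
        exact ⟨by omega, Nat.le_of_dvd (by omega) hdvd, hdvd⟩
    · rintro ⟨h1, h2, h3⟩
      by_cases hx : x ≤ Nat.sqrt m
      · exact Or.inl ⟨h1, hx, h3⟩
      · refine Or.inr ⟨m / x, ?_, ?_⟩
        · obtain ⟨c3, c4, c5, c6⟩ := hB x h3 hm0 (by omega)
          exact (hmemL (m / x)).2 ⟨c4, c3, Nat.div_dvd_of_dvd h3, c6⟩
        · exact (hB x h3 hm0 (by omega)).2.2.1
  -- both sorted without duplicates and with the same members: equal
  exact ((List.perm_ext_iff_of_nodup (sortLHS.imp ne_of_lt) (sortD.imp ne_of_lt)).2 hmem).eq_of_pairwise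
    (fun a b _ _ h h' => absurd h' (lt_asymm h)) sortLHS sortD

theorem bDivLoop_spec (m : Nat) : ∀ (j k : Nat) (sl ll : List Int), 1 ≤ k →
    Nat.sqrt m + 1 - k = j →
    bDivLoop (m : Int) (k : Int) sl ll =
      (sl ++ (((List.range' k (Nat.sqrt m + 1 - k)).filter (fun f => decide (m % f = 0))).map (fun (f : Nat) => (f : Int))),
       ll ++ (((List.range' k (Nat.sqrt m + 1 - k)).filter (fun f => decide (m % f = 0 ∧ f * f ≠ m))).map (fun (f : Nat) => ((m / f : Nat) : Int)))) := by
  intro j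
  induction j with
  | zero =>
    intro k sl ll hk hj
    have hg : ¬ ((k : Int) * (k : Int) ≤ (m : Int)) := by
      rw [not_le]
      have hks : Nat.sqrt m < k := by omega
      have h2 : m < k ^ 2 := Nat.sqrt_lt'.mp hks
      rw [pow_two] at h2
      exact_mod_cast h2
    rw [bDivLoop, dif_neg hg, hj]
    simp
  | succ j ih =>
    intro k sl ll hk hj
    have hks : k ≤ Nat.sqrt m := by omega
    have hkk : k * k ≤ m := by
      have h2 : k ^ 2 ≤ m := Nat.le_sqrt'.mp hks
      rw [pow_two] at h2
      exact h2
    have hg : ((k : Int) * (k : Int) ≤ (m : Int)) := by exact_mod_cast hkk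
    have hmod : PySem.Int.mod (m : Int) (k : Int) = ((m % k : Nat) : Int) := by
      exact_mod_cast PySem.Int.mod_natCast m k
    have hdiv : PySem.Int.floordiv (m : Int) (k : Int) = ((m / k : Nat) : Int) := by
      exact_mod_cast PySem.Int.floordiv_natCast m k
    have hrange : List.range' k (Nat.sqrt m + 1 - k) = k :: List.range' (k + 1) (Nat.sqrt m + 1 - (k + 1)) := by
      rw [hj, show Nat.sqrt m + 1 - (k + 1) = j by omega]
      rfl
    have hc : ((k + 1 : Nat) : Int) = (k : Int) + 1 := by push_cast; ring
    rw [bDivLoop, dif_pos hg, hrange]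
    by_cases hdvd : m % k = 0
    · rw [if_pos (by rw [hmod]; exact_mod_cast hdvd)]
      by_cases hsq : k * k = m
      · rw [if_neg (not_not.2 (by exact_mod_cast hsq))]
        have h := ih (k + 1) (sl ++ [(k : Int)]) ll (by omega) (by omega)
        rw [hc] at h
        rw [h]
        simp [hdvd, hsq]
      · rw [if_pos (fun h => hsq (by exact_mod_cast h))]
        rw [hdiv]
        have h := ih (k + 1) (sl ++ [(k : Int)]) (ll ++ [((m / k : Nat) : Int)]) (by omega) (by omega)
        rw [hc] at h
        rw [h]
        simp [hdvd, hsq]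
    · rw [if_neg (by rw [hmod]; intro h; exact hdvd (by exact_mod_cast h))]
      have h := ih (k + 1) sl ll (by omega) (by omega)
      rw [hc] at h
      rw [h]
      simp [hdvd]

theorem pyRange_filter_eq (m : Nat) :
    (PySem.List.pyRange 1 ((m : Int) + 1) 1).filter (fun f => decide (PySem.Int.mod (m : Int) f = 0)) =
      (natDivs m).map (fun (f : Nat) => (f : Int)) := by
  have h1 : ((m : Int) + 1 - 1).toNat = m := by omega
  have gen : ∀ (l : List Nat),
      (l.map (fun (k : Nat) => (k : Int))).filter (fun f => decide (PySem.Int.mod (m : Int) f = 0)) =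
        (l.filter (fun f => decide (m % f = 0))).map (fun (f : Nat) => (f : Int)) := by
    intro l
    induction l with
    | nil => simp
    | cons k l ih =>
      have hmod : PySem.Int.mod (m : Int) (k : Int) = ((m % k : Nat) : Int) := by
        exact_mod_cast PySem.Int.mod_natCast m k
      simp only [List.map_cons, List.filter_cons, hmod, Int.natCast_eq_zero]
      by_cases hk : m % k = 0
      · rw [if_pos (by simp [hk]), if_pos (by simp [hk]), List.map_cons, ih]
      · rw [if_neg (by simp [hk]), if_neg (by simp [hk]), ih]
  have hpr : PySem.List.pyRange 1 ((m : Int) + 1) 1 = (List.range' 1 m).map (fun (f : Nat) => (f : Int)) := by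
    rw [PySem.List.pyRange_one, h1, List.range'_eq_map_range, List.map_map]
    congr 1
  rw [hpr, gen (List.range' 1 m)]
  rfl

-- ===== VERDICT (by name: the statement is the Claim_ definition above) =====
theorem count_merges_spec : Claim_equal_count_merges := by
  intro arr _
  unfold Spec_count_merges
  simp only [count_merges, count_merges_alt]
  by_cases hn : arr.sum ≤ 0
  · rw [PySem.List.pyRange_one_eq_nil (by omega), bDivLoop, dif_neg (by nlinarith)]
    simp [aLoop, bRun]
  · have hm1 : 1 ≤ arr.sum.toNat := by omega
    rw [aLoop_eq_bRun]
    have hn' : arr.sum = (arr.sum.toNat : Int) := by omega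
    rw [hn', pyRange_filter_eq]
    have hspec := bDivLoop_spec arr.sum.toNat (Nat.sqrt arr.sum.toNat) 1 [] []
      (le_refl 1) (by omega)
    rw [Nat.cast_one] at hspec
    rw [hspec]
    simp only [List.nil_append, Nat.add_sub_cancel]
    have hlist : (natSmall arr.sum.toNat).map (fun (f : Nat) => (f : Int)) ++
        ((natLargeSrc arr.sum.toNat).map
          (fun (f : Nat) => ((arr.sum.toNat / f : Nat) : Int))).reverse =
        (natDivs arr.sum.toNat).map (fun (f : Nat) => (f : Int)) := by
      rw [← divs_split arr.sum.toNat hm1, List.map_append, List.map_reverse, List.map_map]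
      congr 1
    unfold natSmall natLargeSrc at hlist
    rw [hlist]
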